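-- pv_equiv track=rewrite | github.com/emlala/aoc2023 | day5.py | tidy_lines
-- ===== SOURCE A (Python) =====
-- def tidy_lines(lines):
--     lines = [line.strip() for line in lines]
--     seeds = lines.pop(0).split()
--     seeds.pop(0)
--     lines.append(lines.pop(0)) # move the empty string before the first map to the end of the list
--     tidy_lines = []
--     map = []
--
--     # each map is a [[list of [lists]] within a list]
--     for line in lines:
--         if line == '':
--             tidy_lines.append(map)
--             map = []
--         else:
--             map.append(line)
--
--     tidy_lines = [[map.split() for map in line[1:]] for line in tidy_lines]
--
--     return seeds, tidy_lines
-- ===== SOURCE B (Python) =====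
-- def tidy_lines(lines):
--     stripped = [l.strip() for l in lines]
--     seeds = stripped[0].split()
--     del seeds[0]
--     rest = stripped[2:] + [stripped[1]]
--     maps = []
--     while '' in rest:
--         i = rest.index('')
--         maps.append([t.split() for t in rest[1:i]])
--         rest = rest[i+1:]
--     return seeds, maps
-- ===== Notes on version B (the rewrite author's own statement) =====
-- stated objective: alternative
-- what changed: Replaces the single-pass accumulator loop (append current map on each blank line) by a find-separator-and-slice loop: repeatedly locate the next blank line with index(), emit the slice between separators, and continue on the suffix.
import Mathlib
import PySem

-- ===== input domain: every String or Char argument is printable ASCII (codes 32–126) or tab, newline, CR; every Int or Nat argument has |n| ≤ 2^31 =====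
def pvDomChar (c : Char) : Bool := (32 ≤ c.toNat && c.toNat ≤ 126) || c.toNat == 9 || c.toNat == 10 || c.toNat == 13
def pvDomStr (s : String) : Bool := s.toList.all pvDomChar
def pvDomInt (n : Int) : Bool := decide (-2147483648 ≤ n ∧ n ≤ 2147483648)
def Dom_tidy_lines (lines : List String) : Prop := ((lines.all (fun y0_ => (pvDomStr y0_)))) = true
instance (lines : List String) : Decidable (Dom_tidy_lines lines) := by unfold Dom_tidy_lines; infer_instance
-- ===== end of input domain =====

-- B replaces A's accumulator loop (append current block on each blank line) by repeated
-- find-the-next-blank-with-index() and slicing between separators; same cost, alternative structure.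

-- ===== PORT A =====
def tidy_lines (lines : List String) : List String × List (List (List String)) :=
  let stripped := lines.map PySem.Str.strip
  match PySem.List.pop? stripped 0 with                         -- lines.pop(0)
  | none => ([], [])
  | some (first, lines1) =>
    let seeds0 := PySem.Str.split₀ first
    match PySem.List.pop? seeds0 0 with                         -- seeds.pop(0)
    | none => ([], [])
    | some (_, seeds) =>
      match PySem.List.pop? lines1 0 with                       -- lines.append(lines.pop(0))
      | none => ([], [])
      | some (second, lines2) =>
        let rest := lines2 ++ [second]
        let st := rest.foldl
          (fun (st : List (List String) × List String) line =>
            if line = "" then (st.1 ++ [st.2], []) else (st.1, st.2 ++ [line]))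
          ([], [])
        (seeds, st.1.map (fun blk =>
          (PySem.List.slice blk (some 1) none).map PySem.Str.split₀))   -- line[1:], .split()

-- ===== PORT B =====
-- while '' in rest: i = rest.index(''); maps.append([t.split() for t in rest[1:i]]); rest = rest[i+1:]
def tidyAltLoop (rest : List String) (maps : List (List (List String))) :
    List (List (List String)) :=
  if _hmem : "" ∈ rest then
    match _hidx : PySem.List.index? rest "" with
    | some i =>
        tidyAltLoop (PySem.List.slice rest (some ((i : Int) + 1)) none)
          (maps ++ [(PySem.List.slice rest (some 1) (some (i : Int))).map PySem.Str.split₀])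
    | none => maps
  else maps
termination_by rest.length
decreasing_by
  have : ((i : Int) + 1) = ((i + 1 : Nat) : Int) := by push_cast; ring
  rw [this, PySem.List.slice_from_natCast]
  have hne : rest ≠ [] := List.ne_nil_of_mem _hmem
  have := List.length_pos_of_ne_nil hne
  simp only [List.length_drop]
  omega

def tidy_lines_alt (lines : List String) : List String × List (List (List String)) :=
  let stripped := lines.map PySem.Str.strip
  match PySem.List.pyGet? stripped 0, PySem.List.pyGet? stripped 1 with   -- stripped[0], stripped[1]
  | some s0, some s1 =>
    let seeds0 := PySem.Str.split₀ s0
    match PySem.List.pop? seeds0 0 with                         -- del seeds[0]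
    | none => ([], [])
    | some (_, seeds) =>
      let rest := PySem.List.slice stripped (some 2) none ++ [s1]   -- stripped[2:] + [stripped[1]]
      (seeds, tidyAltLoop rest [])
  | _, _ => ([], [])

-- ===== PRECONDITION & SPEC =====
-- Pre_ excludes exactly the inputs where A raises IndexError: fewer than two lines
-- (the two pop(0) calls), or a first line whose split() is empty (seeds.pop(0)).
def Pre_tidy_lines (lines : List String) : Prop :=
  2 ≤ lines.length ∧ PySem.Str.split₀ (PySem.Str.strip lines.headI) ≠ []
instance (lines : List String) : Decidable (Pre_tidy_lines lines) := by
  unfold Pre_tidy_lines; infer_instance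

def pvWitness_tidy_lines : List String :=
  ["seeds: 79 14", "", "seed-to-soil map:", "50 98 2", "", "1 2 3"]

def Spec_tidy_lines (lines : List String) (out : List String × List (List (List String))) : Prop :=
  out = tidy_lines_alt lines
instance (lines : List String) (out : List String × List (List (List String))) :
    Decidable (Spec_tidy_lines lines out) := by unfold Spec_tidy_lines; infer_instance

-- ===== CLAIM (what is proved, stated in full; the proofs are below) =====
def Claim_equal_tidy_lines : Prop :=
  ∀ (lines : List String), Dom_tidy_lines lines → Pre_tidy_lines lines →
    Spec_tidy_lines lines (tidy_lines lines)

-- ===== LEMMAS AND PROOFS =====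

-- Abstract description of the blocks both loops build from the rotated line list.
def gBlocks : List String → List String → List (List String)
  | [], _ => []
  | l :: rs, m => if l = "" then m :: gBlocks rs [] else gBlocks rs (m ++ [l])

lemma foldA_eq_gBlocks (r : List String) :
    ∀ (t : List (List String)) (m : List String),
      (r.foldl (fun (st : List (List String) × List String) line =>
        if line = "" then (st.1 ++ [st.2], []) else (st.1, st.2 ++ [line])) (t, m)).1
      = t ++ gBlocks r m := by
  induction r with
  | nil => intro t m; simp [gBlocks]
  | cons l rs ih =>
    intro t m
    by_cases hl : l = ""
    · simp [gBlocks, hl, ih, List.append_assoc]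
    · simp [gBlocks, hl, ih]

lemma gBlocks_no_sep (r : List String) (h : "" ∉ r) (m : List String) :
    gBlocks r m = [] := by
  induction r generalizing m with
  | nil => rfl
  | cons l rs ih =>
    have hl : l ≠ "" := fun he => h (he ▸ List.mem_cons_self ..)
    simp only [gBlocks, if_neg hl]
    exact ih (fun hc => h (List.mem_cons_of_mem _ hc)) _

lemma gBlocks_append_sep (p : List String) (hp : "" ∉ p) (q : List String) (m : List String) :
    gBlocks (p ++ "" :: q) m = (m ++ p) :: gBlocks q [] := by
  induction p generalizing m with
  | nil => simp [gBlocks]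
  | cons a p' ih =>
    have ha : a ≠ "" := fun he => hp (he ▸ List.mem_cons_self ..)
    have hp' : "" ∉ p' := fun hc => hp (List.mem_cons_of_mem _ hc)
    rw [List.cons_append]
    simp only [gBlocks, if_neg ha, ih hp']
    simp

lemma take_drop_mid (p q : List String) :
    (((p ++ "" :: q).drop 1).take (p.length - 1)) = p.drop 1 := by
  cases p with
  | nil => simp
  | cons a p' =>
    simp only [List.cons_append, List.drop_succ_cons, List.drop_zero, List.length_cons,
      Nat.add_sub_cancel]
    rw [List.take_left' rfl]

lemma tidyAltLoop_eq (r : List String) :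
    ∀ maps, tidyAltLoop r maps
      = maps ++ (gBlocks r []).map (fun blk => (blk.drop 1).map PySem.Str.split₀) := by
  induction hn : r.length using Nat.strong_induction_on generalizing r with
  | _ n ih =>
    intro maps
    by_cases hmem : "" ∈ r
    · cases hidx : PySem.List.index? r "" with
      | none => exact absurd ((PySem.List.index?_eq_none_iff r "").mp hidx) (not_not_intro hmem)
      | some i =>
        obtain ⟨p, q, hr, hlenp, hp⟩ := (PySem.List.index?_eq_some_iff r "" i).mp hidx
        subst hr
        rw [tidyAltLoop, dif_pos hmem]
        split
        next j heq =>
          have hj : j = i := by rw [hidx] at heq; exact (Option.some_inj.mp heq).symm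
          subst hj hlenp
          -- the recursive argument rest[i+1:] is q
          have hdrop : PySem.List.slice (p ++ "" :: q) (some ((p.length : Int) + 1)) none = q := by
            have h1 : ((p.length : Int) + 1) = ((p.length + 1 : Nat) : Int) := by push_cast; ring
            rw [h1, PySem.List.slice_from_natCast]
            have h2 : p ++ "" :: q = (p ++ [""]) ++ q := by simp
            rw [h2, List.drop_left' (by simp)]
          -- the emitted block rest[1:i] is p without its head
          have hblk : PySem.List.slice (p ++ "" :: q) (some 1) (some (p.length : Int))
              = p.drop 1 := by
            rw [PySem.List.slice_toNat _ (by norm_num) (Int.natCast_nonneg _)]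
            simpa using take_drop_mid p q
          rw [hdrop, hblk]
          have hql : q.length < n := by
            subst hn; simp only [List.length_append, List.length_cons]; omega
          rw [ih q.length hql q rfl]
          rw [gBlocks_append_sep p hp q []]
          simp [List.append_assoc]
        next heq => rw [hidx] at heq; cases heq
    · rw [tidyAltLoop, dif_neg hmem, gBlocks_no_sep r hmem]
      simp

-- ===== VERDICT (by name: the statement is the Claim_ definition above) =====
theorem tidy_lines_spec : Claim_equal_tidy_lines := by
  intro lines _hdom hpre
  obtain ⟨hlen, hseeds⟩ := hpre
  cases lines with
  | nil => simp at hlen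
  | cons l0 rest =>
    cases rest with
    | nil => simp at hlen
    | cons l1 ls =>
      unfold Spec_tidy_lines tidy_lines tidy_lines_alt
      simp only [List.map_cons, PySem.List.pop?_zero_cons]
      have hget0 : PySem.List.pyGet? (PySem.Str.strip l0 :: PySem.Str.strip l1 :: ls.map PySem.Str.strip) (0:Int)
          = some (PySem.Str.strip l0) := by
        have h0 : (0:Int) ≤ (ls.length:Int) + 1 := by positivity
        simp [PySem.List.pyGet?, PySem.List.pyIdx?, h0]
      have hget1 : PySem.List.pyGet? (PySem.Str.strip l0 :: PySem.Str.strip l1 :: ls.map PySem.Str.strip) (1:Int)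
          = some (PySem.Str.strip l1) := by

        simp [PySem.List.pyGet?, PySem.List.pyIdx?]

      rw [hget0, hget1]
      have hslice2 : PySem.List.slice (PySem.Str.strip l0 :: PySem.Str.strip l1 :: ls.map PySem.Str.strip) (some 2) none
          = ls.map PySem.Str.strip := by
        rw [PySem.List.slice_from _ (by norm_num)]
        rfl
      rw [hslice2]
      cases hs : PySem.Str.split₀ (PySem.Str.strip l0) with
      | nil => exact absurd hs (by simpa using hseeds)
      | cons s0 ss =>
        simp only [PySem.List.pop?_zero_cons]
        rw [tidyAltLoop_eq]
        have hfold := foldA_eq_gBlocks (ls.map PySem.Str.strip ++ [PySem.Str.strip l1]) [] []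
        simp only [hfold, List.nil_append]
        have hfun : (fun blk => (PySem.List.slice blk (some 1) none).map PySem.Str.split₀)
            = (fun blk : List String => (blk.drop 1).map PySem.Str.split₀) := by
          funext blk
          rw [PySem.List.slice_from_one, List.drop_one]
        rw [hfun, hs]
        simp only [PySem.List.pop?_zero_cons]
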